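-- pv_equiv track=rewrite | github.com/RizgarMella/academy-timetable-system | solver/engine.py | _find_free_block_multi
-- ===== SOURCE A (Python) =====
-- def _find_free_block_multi(earliest, dur_days, latest_end,
--                            lec_ids, room_id,
--                            lec_occupied, room_occupied,
--                            lec_unavail, room_unavail):
--     """Find the earliest contiguous block where ALL lecturers AND the room are free."""
--     max_day = latest_end - dur_days + 1
--     day = earliest
--
--     while day <= max_day:
--         block_ok = True
--         for d in range(dur_days):
--             dd = day + d
--             if dd in room_occupied[room_id]:
--                 day = dd + 1; block_ok = False; break
--             if dd in room_unavail.get(room_id, set()):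
--                 day = dd + 1; block_ok = False; break
--             for lid in lec_ids:
--                 if dd in lec_occupied[lid]:
--                     day = dd + 1; block_ok = False; break
--                 if dd in lec_unavail.get(lid, set()):
--                     day = dd + 1; block_ok = False; break
--             if not block_ok:
--                 break
--         if block_ok:
--             return day
--     return None
-- ===== SOURCE B (Python) =====
-- def _find_free_block_multi(earliest, dur_days, latest_end,
--                            lec_ids, room_id,
--                            lec_occupied, room_occupied,
--                            lec_unavail, room_unavail):
--     """Earliest contiguous block free for all lecturers and the room:
--     precompute the union of blocked days once, then one linear scan
--     tracking the length of the current run of consecutive free days."""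
--     max_day = latest_end - dur_days + 1
--     if earliest > max_day:
--         return None
--     if dur_days <= 0:
--         return earliest
--     blocked = set(room_occupied[room_id]) | set(room_unavail.get(room_id, ()))
--     for lid in lec_ids:
--         blocked |= set(lec_occupied[lid])
--         blocked |= set(lec_unavail.get(lid, ()))
--     run = 0
--     for day in range(earliest, latest_end + 1):
--         if day in blocked:
--             run = 0
--         else:
--             run += 1
--             if run == dur_days:
--                 return day - dur_days + 1
--     return None
-- ===== Notes on version B (the rewrite author's own statement) =====
-- stated objective: alternative
-- what changed: A re-tests every candidate start day against every lecturer/room container, restarting after each conflict; B precomputes the union of all blocked days into one set and finds the block with a single linear scan tracking the length of the current run of consecutive free days.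
-- outside the precondition, e.g. on _find_free_block_multi(0, 1, 0, [5], 0, {}, {0: [0]}, {}, {}): A returns None, B raises KeyError
import Mathlib
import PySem

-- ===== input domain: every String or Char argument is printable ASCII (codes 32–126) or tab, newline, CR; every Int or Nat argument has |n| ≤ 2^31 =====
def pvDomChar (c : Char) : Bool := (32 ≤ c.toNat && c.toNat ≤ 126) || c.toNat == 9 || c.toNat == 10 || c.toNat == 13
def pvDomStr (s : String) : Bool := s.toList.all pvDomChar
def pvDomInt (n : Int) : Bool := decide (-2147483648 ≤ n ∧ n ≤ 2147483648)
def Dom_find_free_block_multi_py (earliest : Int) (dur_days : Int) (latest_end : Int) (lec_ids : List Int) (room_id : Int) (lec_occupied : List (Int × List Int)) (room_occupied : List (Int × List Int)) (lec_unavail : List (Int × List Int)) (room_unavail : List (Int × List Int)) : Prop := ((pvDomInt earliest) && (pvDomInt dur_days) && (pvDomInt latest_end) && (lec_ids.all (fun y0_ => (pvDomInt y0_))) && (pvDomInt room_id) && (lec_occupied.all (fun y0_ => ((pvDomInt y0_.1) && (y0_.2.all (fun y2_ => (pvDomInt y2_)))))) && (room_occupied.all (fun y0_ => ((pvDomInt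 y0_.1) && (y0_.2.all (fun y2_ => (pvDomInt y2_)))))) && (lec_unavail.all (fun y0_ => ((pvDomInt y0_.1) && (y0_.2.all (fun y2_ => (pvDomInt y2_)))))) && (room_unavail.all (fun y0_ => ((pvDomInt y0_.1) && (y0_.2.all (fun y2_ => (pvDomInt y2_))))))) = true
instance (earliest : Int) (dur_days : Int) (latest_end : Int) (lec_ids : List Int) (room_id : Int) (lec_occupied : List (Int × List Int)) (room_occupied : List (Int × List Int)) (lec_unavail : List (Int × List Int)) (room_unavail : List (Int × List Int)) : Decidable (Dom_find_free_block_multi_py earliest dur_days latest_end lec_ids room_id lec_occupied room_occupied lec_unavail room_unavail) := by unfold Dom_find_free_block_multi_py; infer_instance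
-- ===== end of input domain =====

-- B replaces A's restart-on-conflict rescan by one precomputed blocked-day set plus a single
-- linear scan counting consecutive free days (objective: alternative algorithm; measured ~1.3x, not claimed faster).

-- ===== PORT A =====
-- shared dict-lookup helper (assoc list, first match; [] outside Pre_ where Python raises KeyError)
def pvLookup (d : List (Int × List Int)) (k : Int) : List Int :=
  match d with
  | [] => []
  | (k', v) :: rest => if k' == k then v else pvLookup rest k

-- A's per-day membership checks, in A's order (|| short-circuits like A's breaks)
def pvPredA (lec_ids : List Int) (room_id : Int) (lec_occupied room_occupied lec_unavail room_unavail : List (Int × List Int)) (dd : Int) : Bool :=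
  (pvLookup room_occupied room_id).contains dd
  || (pvLookup room_unavail room_id).contains dd
  || lec_ids.any (fun lid => (pvLookup lec_occupied lid).contains dd || (pvLookup lec_unavail lid).contains dd)

-- A's inner 'for d in range(dur_days)' loop: first blocked day dd in the block, if any
def pvFindBlock (ds : List Int) (day : Int) (pred : Int → Bool) : Option Int :=
  match ds with
  | [] => none
  | d :: rest =>
    let dd := day + d
    if pred dd then some dd else pvFindBlock rest day pred

-- needed by pvALoop's termination proof
theorem pvFindBlock_some {ds : List Int} {day dd : Int} {pred : Int → Bool}
    (h : pvFindBlock ds day pred = some dd) : ∃ d ∈ ds, dd = day + d ∧ pred dd = true := by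
  induction ds with
  | nil => simp [pvFindBlock] at h
  | cons d rest ih =>
    simp only [pvFindBlock] at h
    by_cases hp : pred (day + d) = true
    · simp [hp] at h
      exact ⟨d, by simp, by omega, h ▸ hp⟩
    · simp [hp] at h
      obtain ⟨e, he, hdd, hpe⟩ := ih h
      exact ⟨e, by simp [he], hdd, hpe⟩

-- A's 'while day <= max_day' loop; on conflict at dd, day jumps to dd+1
def pvALoop (max_day dur : Int) (pred : Int → Bool) (day : Int) : Option Int :=
  if h : day ≤ max_day then
    match hfb : pvFindBlock (PySem.List.pyRange 0 dur 1) day pred with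
    | none => some day
    | some dd => pvALoop max_day dur pred (dd + 1)
  else none
termination_by (max_day + 1 - day).toNat
decreasing_by
  obtain ⟨d, hd, hdd, -⟩ := pvFindBlock_some hfb
  have h0 : (0:Int) ≤ d := (PySem.List.mem_pyRange_one.mp hd).1
  omega

def find_free_block_multi_py (earliest : Int) (dur_days : Int) (latest_end : Int) (lec_ids : List Int) (room_id : Int) (lec_occupied : List (Int × List Int)) (room_occupied : List (Int × List Int)) (lec_unavail : List (Int × List Int)) (room_unavail : List (Int × List Int)) : Option Int :=
  pvALoop (latest_end - dur_days + 1) dur_days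
    (pvPredA lec_ids room_id lec_occupied room_occupied lec_unavail room_unavail) earliest

-- ===== PORT B =====
-- B's scan loop: run = length of current streak of consecutive free days
def pvBScan (days : List Int) (run dur : Int) (blocked : List Int) : Option Int :=
  match days with
  | [] => none
  | day :: rest =>
    if blocked.contains day then pvBScan rest 0 dur blocked
    else if run + 1 == dur then some (day - dur + 1)
    else pvBScan rest (run + 1) dur blocked

def find_free_block_multi_py_alt (earliest : Int) (dur_days : Int) (latest_end : Int) (lec_ids : List Int) (room_id : Int) (lec_occupied : List (Int × List Int)) (room_occupied : List (Int × List Int)) (lec_unavail : List (Int × List Int)) (room_unavail : List (Int × List Int)) : Option Int :=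
  let max_day := latest_end - dur_days + 1
  if earliest > max_day then none
  else if dur_days ≤ 0 then some earliest
  else
    let blocked : PySem.Set Int :=
      lec_ids.foldl
        (fun s lid => PySem.Set.union (PySem.Set.union s (pvLookup lec_occupied lid)) (pvLookup lec_unavail lid))
        (PySem.Set.union (PySem.Set.ofList (pvLookup room_occupied room_id)) (pvLookup room_unavail room_id))
    pvBScan (PySem.List.pyRange earliest (latest_end + 1) 1) 0 dur_days blocked

-- ===== PRECONDITION & SPEC =====
-- Pre_ excludes exactly the KeyError inputs: when the window is feasible (earliest ≤ max_day, dur_days > 0)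
-- Python A looks up room_occupied[room_id] and, lazily, lec_occupied[lid]; Pre_ requires all these keys.
-- It is slightly narrower than A's lazy evaluation (A can return None without ever reaching a missing
-- lecturer key when an earlier check always blocks first); B looks all keys up eagerly and raises there.
def Pre_find_free_block_multi_py (earliest : Int) (dur_days : Int) (latest_end : Int) (lec_ids : List Int) (room_id : Int) (lec_occupied : List (Int × List Int)) (room_occupied : List (Int × List Int)) (lec_unavail : List (Int × List Int)) (room_unavail : List (Int × List Int)) : Prop :=
  (earliest ≤ latest_end - dur_days + 1 ∧ 0 < dur_days) →
    (room_occupied.any (fun p => p.1 == room_id) = true ∧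
     ∀ lid ∈ lec_ids, lec_occupied.any (fun p => p.1 == lid) = true)
instance (earliest : Int) (dur_days : Int) (latest_end : Int) (lec_ids : List Int) (room_id : Int) (lec_occupied : List (Int × List Int)) (room_occupied : List (Int × List Int)) (lec_unavail : List (Int × List Int)) (room_unavail : List (Int × List Int)) : Decidable (Pre_find_free_block_multi_py earliest dur_days latest_end lec_ids room_id lec_occupied room_occupied lec_unavail room_unavail) := by unfold Pre_find_free_block_multi_py; infer_instance

def pvWitness_find_free_block_multi_py : Int × Int × Int × List Int × Int × (List (Int × List Int)) × (List (Int × List Int)) × (List (Int × List Int)) × (List (Int × List Int)) :=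
  (0, 1, 3, [7], 5, [(7, [1])], [(5, [0])], [], [])

def Spec_find_free_block_multi_py (earliest : Int) (dur_days : Int) (latest_end : Int) (lec_ids : List Int) (room_id : Int) (lec_occupied : List (Int × List Int)) (room_occupied : List (Int × List Int)) (lec_unavail : List (Int × List Int)) (room_unavail : List (Int × List Int)) (out : Option Int) : Prop := out = find_free_block_multi_py_alt earliest dur_days latest_end lec_ids room_id lec_occupied room_occupied lec_unavail room_unavail
instance (earliest : Int) (dur_days : Int) (latest_end : Int) (lec_ids : List Int) (room_id : Int) (lec_occupied : List (Int × List Int)) (room_occupied : List (Int × List Int)) (lec_unavail : List (Int × List Int)) (room_unavail : List (Int × List Int)) (out : Option Int) : Decidable (Spec_find_free_block_multi_py earliest dur_days latest_end lec_ids room_id lec_occupied room_occupied lec_unavail room_unavail out) := by unfold Spec_find_free_block_multi_py; infer_instance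

-- ===== CLAIM (what is proved, stated in full; the proofs are below) =====
def Claim_equal_find_free_block_multi_py : Prop := ∀ (earliest : Int) (dur_days : Int) (latest_end : Int) (lec_ids : List Int) (room_id : Int) (lec_occupied : List (Int × List Int)) (room_occupied : List (Int × List Int)) (lec_unavail : List (Int × List Int)) (room_unavail : List (Int × List Int)), Dom_find_free_block_multi_py earliest dur_days latest_end lec_ids room_id lec_occupied room_occupied lec_unavail room_unavail → Pre_find_free_block_multi_py earliest dur_days latest_end lec_ids room_id lec_occupied room_occupied lec_unavail room_unavail → Spec_find_free_block_multi_py earliest dur_days latest_end lec_ids room_id lec_occupied room_occupied lec_unavail room_unavail (find_free_block_multi_py earliest dur_days latest_end lec_ids room_id lec_occupied room_occupied lec_unavail room_unavail)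

-- ===== LEMMAS AND PROOFS =====

-- reference function: least free start ≥ day, where "free" = no blocked day in [s, s+dur)
def pvFreeB (pred : Int → Bool) (dur s : Int) : Bool :=
  (PySem.List.pyRange s (s + dur) 1).all (fun t => !pred t)

def pvFirst (max_day dur : Int) (pred : Int → Bool) (day : Int) : Option Int :=
  if h : day ≤ max_day then
    if pvFreeB pred dur day then some day else pvFirst max_day dur pred (day + 1)
  else none
termination_by (max_day + 1 - day).toNat

theorem pvFindBlock_isNone (ds : List Int) (day : Int) (pred : Int → Bool) :
    (pvFindBlock ds day pred = none) ↔ ∀ d ∈ ds, pred (day + d) = false := by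
  induction ds with
  | nil => simp [pvFindBlock]
  | cons d rest ih =>
    simp only [pvFindBlock]
    by_cases hp : pred (day + d) = true
    · simp [hp]
    · simp [hp, ih]

theorem pvFreeB_iff (pred : Int → Bool) (dur day : Int) :
    pvFreeB pred dur day = true ↔ ∀ t : Int, day ≤ t → t < day + dur → pred t = false := by
  simp only [pvFreeB, List.all_eq_true, PySem.List.mem_pyRange_one, Bool.not_eq_eq_eq_not,
    Bool.not_true]
  constructor
  · intro h t h1 h2; exact h t ⟨h1, h2⟩
  · intro h t ⟨h1, h2⟩; exact h t h1 h2

theorem pvFreeB_findBlock (pred : Int → Bool) (dur day : Int) :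
    pvFreeB pred dur day = true ↔ pvFindBlock (PySem.List.pyRange 0 dur 1) day pred = none := by
  rw [pvFreeB_iff, pvFindBlock_isNone]
  constructor
  · intro h d hd
    obtain ⟨h0, h1⟩ := PySem.List.mem_pyRange_one.mp hd
    exact h (day + d) (by omega) (by omega)
  · intro h t h1 h2
    have := h (t - day) (PySem.List.mem_pyRange_one.mpr ⟨by omega, by omega⟩)
    simpa [show day + (t - day) = t by omega] using this

theorem pvFirst_skip (max_day dur : Int) (pred : Int → Bool) (day e : Int)
    (hle : day ≤ e) (hblk : ∀ s : Int, day ≤ s → s < e → pvFreeB pred dur s = false) :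
    pvFirst max_day dur pred day = pvFirst max_day dur pred e := by
  by_cases h : day = e
  · rw [h]
  · have hlt : day < e := by omega
    rw [pvFirst]
    by_cases hm : day ≤ max_day
    · rw [dif_pos hm, hblk day le_rfl hlt, if_neg (by simp)]
      exact pvFirst_skip max_day dur pred (day + 1) e (by omega)
        (fun s h1 h2 => hblk s (by omega) h2)
    · rw [dif_neg hm]
      rw [pvFirst]
      have hm' : ¬ e ≤ max_day := by omega
      rw [dif_neg hm']
termination_by (e - day).toNat
decreasing_by omega

theorem pvALoop_eq_pvFirst (max_day dur : Int) (pred : Int → Bool) (day : Int) :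
    pvALoop max_day dur pred day = pvFirst max_day dur pred day := by
  rw [pvALoop]
  by_cases h : day ≤ max_day
  · rw [dif_pos h]
    split
    · rename_i hfb
      rw [pvFirst, dif_pos h, if_pos ((pvFreeB_findBlock pred dur day).mpr hfb)]
    · rename_i dd hfb
      obtain ⟨d, hd, hdd, hp⟩ := pvFindBlock_some hfb
      obtain ⟨h0, h1⟩ := PySem.List.mem_pyRange_one.mp hd
      rw [pvALoop_eq_pvFirst max_day dur pred (dd + 1)]
      refine (pvFirst_skip max_day dur pred day (dd + 1) (by omega) ?_).symm
      intro s hs1 hs2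
      have : ¬ (pvFreeB pred dur s = true) := by
        rw [pvFreeB_iff]
        intro hall
        have := hall dd (by omega) (by omega)
        rw [hp] at this; exact Bool.true_eq_false.mp this
      simpa using this
  · rw [dif_neg h, pvFirst, dif_neg h]
termination_by (max_day + 1 - day).toNat
decreasing_by
  have h0 : (0:Int) ≤ d := (PySem.List.mem_pyRange_one.mp hd).1
  omega

theorem pvBScan_eq_pvFirst (L dur : Int) (blocked : List Int) (c run : Int)
    (hdur : 0 < dur) (hrun0 : 0 ≤ run) (hrun : run < dur)
    (hwin : ∀ t : Int, c - run ≤ t → t < c → blocked.contains t = false) :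
    pvBScan (PySem.List.pyRange c (L + 1) 1) run dur blocked
      = pvFirst (L - dur + 1) dur (fun t => blocked.contains t) (c - run) := by
  by_cases hc : c ≤ L
  · rw [PySem.List.pyRange_one_cons (by omega)]
    simp only [pvBScan]
    by_cases hb : blocked.contains c = true
    · rw [if_pos hb]
      rw [pvBScan_eq_pvFirst L dur blocked (c + 1) 0 hdur le_rfl hdur (by omega)]
      have : (c + 1 - 0 : Int) = c + 1 := by omega
      rw [this]
      refine (pvFirst_skip _ _ _ (c - run) (c + 1) (by omega) ?_).symm
      intro s h1 h2
      have : ¬ (pvFreeB (fun t => blocked.contains t) dur s = true) := by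
        rw [pvFreeB_iff]
        intro hall
        have := hall c (by omega) (by omega)
        rw [hb] at this; exact Bool.true_eq_false.mp this
      simpa using this
    · rw [if_neg hb]
      have hbf : blocked.contains c = false := by
        cases h : blocked.contains c
        · rfl
        · exact absurd h hb
      by_cases heq : run + 1 = dur
      · rw [if_pos (by simpa using heq)]
        have hcd : c - dur + 1 = c - run := by omega
        rw [hcd]
        rw [pvFirst, dif_pos (by omega), if_pos ?_]
        rw [pvFreeB_iff]
        intro t h1 h2
        by_cases ht : t < c
        · exact hwin t (by omega) ht
        · have : t = c := by omega
          rw [this]; exact hbf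
      · rw [if_neg (by simpa using heq)]
        rw [pvBScan_eq_pvFirst L dur blocked (c + 1) (run + 1) hdur (by omega) (by omega) ?_]
        · have : (c + 1 - (run + 1) : Int) = c - run := by omega
          rw [this]
        · intro t h1 h2
          by_cases ht : t < c
          · exact hwin t (by omega) ht
          · have : t = c := by omega
            rw [this]; exact hbf
  · rw [PySem.List.pyRange_one_eq_nil (by omega)]
    simp only [pvBScan]
    rw [pvFirst, dif_neg (by omega)]
termination_by (L + 1 - c).toNat
decreasing_by all_goals omega

-- membership in B's precomputed blocked set equals A's per-day predicate
theorem pvBlocked_mem (lec_ids : List Int) (room_id : Int)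
    (lec_occupied room_occupied lec_unavail room_unavail : List (Int × List Int)) (x : Int) :
    (x ∈ lec_ids.foldl
        (fun s lid => PySem.Set.union (PySem.Set.union s (pvLookup lec_occupied lid)) (pvLookup lec_unavail lid))
        (PySem.Set.union (PySem.Set.ofList (pvLookup room_occupied room_id)) (pvLookup room_unavail room_id)))
      ↔ pvPredA lec_ids room_id lec_occupied room_occupied lec_unavail room_unavail x = true := by
  simp only [pvPredA, Bool.or_eq_true, List.any_eq_true, List.contains_iff_mem]
  have key : ∀ (ids : List Int) (init : PySem.Set Int),
      x ∈ ids.foldl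
        (fun s lid => PySem.Set.union (PySem.Set.union s (pvLookup lec_occupied lid)) (pvLookup lec_unavail lid)) init
      ↔ x ∈ init ∨ ∃ lid ∈ ids, x ∈ pvLookup lec_occupied lid ∨ x ∈ pvLookup lec_unavail lid := by
    intro ids
    induction ids with
    | nil => simp
    | cons lid rest ih =>
      intro init
      simp only [List.foldl_cons, ih, PySem.Set.mem_union]
      constructor
      · rintro (((h | h) | h) | ⟨l, hl, h⟩)
        · exact Or.inl h
        · exact Or.inr ⟨lid, by simp, Or.inl h⟩
        · exact Or.inr ⟨lid, by simp, Or.inr h⟩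
        · exact Or.inr ⟨l, by simp [hl], h⟩
      · rintro (h | ⟨l, hl, h⟩)
        · exact Or.inl (Or.inl (Or.inl h))
        · rcases List.mem_cons.mp hl with heq | hm
          · subst heq
            rcases h with h | h
            · exact Or.inl (Or.inl (Or.inr h))
            · exact Or.inl (Or.inr h)
          · exact Or.inr ⟨l, hm, h⟩
  rw [key]
  simp [PySem.Set.mem_union, PySem.Set.mem_ofList, or_assoc]

-- ===== VERDICT (by name: the statement is the Claim_ definition above) =====
theorem find_free_block_multi_py_spec : Claim_equal_find_free_block_multi_py := by
  intro earliest dur_days latest_end lec_ids room_id lec_occupied room_occupied lec_unavail room_unavail _ _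
  unfold Spec_find_free_block_multi_py find_free_block_multi_py find_free_block_multi_py_alt
  set max_day := latest_end - dur_days + 1 with hmd
  by_cases hE : earliest > max_day
  · rw [if_pos hE, pvALoop, dif_neg (by omega)]
  · rw [if_neg hE]
    by_cases hD : dur_days ≤ 0
    · rw [if_pos hD, pvALoop, dif_pos (by omega),
        PySem.List.pyRange_one_eq_nil (by omega)]
      rfl
    · rw [if_neg hD]
      rw [pvALoop_eq_pvFirst]
      rw [show latest_end + 1 = (latest_end) + 1 from rfl]
      rw [pvBScan_eq_pvFirst latest_end dur_days _ earliest 0 (by omega) le_rfl (by omega)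
        (by intro t h1 h2; omega)]
      have : (earliest - 0 : Int) = earliest := by omega
      rw [this]
      congr 1
      funext t
      have hmem := pvBlocked_mem lec_ids room_id lec_occupied room_occupied lec_unavail room_unavail t
      rw [Bool.eq_iff_iff, List.contains_iff_mem]
      exact hmem.symm
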